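-- pv_equiv track=rewrite | github.com/jzho954/car-scraper | main.py | grab_details
-- ===== SOURCE A (Python) =====
-- def grab_details(car_text):
--     name =""
--     location = ""
--     kms = ""
--     engine = ""
--     transmission = ""
--     price = ""
--     count = 0
--     lines = car_text.splitlines()
--     lines = [line for line in lines if "Listed within the last 7 days" not in line]
--     while lines:
--         line = lines.pop(0)
--         if count ==0:
--             name = line
--             count += 1
--         if count ==1 and "," in line:
--             location = line
--             count += 1
--         if "km" in line:
--             kms = line
--         if "Automatic"  in line:
--             transmission = line
--         if "Manual" in line:
--             transmission = line
--
--         if "cc" in line: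
--             engine = line
--         if "$" in line:
--             price = line
--
--     return {
--         "Name": name,
--         "Location": location,
--         "KMs": kms,
--         "Engine Size": engine,
--         "Transmission": transmission,
--         "Price": price
--     }
-- ===== SOURCE B (Python) =====
-- def grab_details(car_text):
--     lines = [l for l in car_text.splitlines()
--              if "Listed within the last 7 days" not in l]
--
--     def last_with(sub):
--         return next((l for l in reversed(lines) if sub in l), "")
--
--     return {
--         "Name": lines[0] if lines else "",
--         "Location": next((l for l in lines if "," in l), ""),
--         "KMs": last_with("km"),
--         "Engine Size": last_with("cc"),
--         "Transmission": next((l for l in reversed(lines)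
--                               if "Manual" in l or "Automatic" in l), ""),
--         "Price": last_with("$"),
--     }
-- ===== Notes on version B (the rewrite author's own statement) =====
-- stated objective: simpler
-- what changed: Replaces A's destructive pop-loop with its count state machine by direct per-field extraction: name is the first kept line, location the first line containing a comma, and the remaining fields are early-exit backwards searches for the last line containing the field's keyword.
import Mathlib
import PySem

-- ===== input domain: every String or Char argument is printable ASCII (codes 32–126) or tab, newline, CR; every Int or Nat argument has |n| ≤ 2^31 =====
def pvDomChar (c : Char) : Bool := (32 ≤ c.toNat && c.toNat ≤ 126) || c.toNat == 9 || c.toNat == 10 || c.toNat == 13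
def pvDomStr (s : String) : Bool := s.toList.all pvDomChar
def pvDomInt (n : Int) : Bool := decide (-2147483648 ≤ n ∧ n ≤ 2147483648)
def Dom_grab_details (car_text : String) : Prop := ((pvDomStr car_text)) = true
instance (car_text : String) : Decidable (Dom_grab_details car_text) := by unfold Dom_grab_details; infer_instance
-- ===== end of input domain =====

-- B replaces A's count-driven pop loop by direct per-field extraction (head, first comma line,
-- and early-exit backwards searches for the last matching line): simpler, same cost.

-- ===== PORT A =====
-- the while-lines-pop(0) loop of A, one recursive step per popped line, same assignments in the same order
def grabLoopA (ls : List String) (name loc kms eng trans price : String) (count : Int) :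
    List (String × String) :=
  match ls with
  | [] =>
      [("Name", name), ("Location", loc), ("KMs", kms), ("Engine Size", eng),
       ("Transmission", trans), ("Price", price)]
  | line :: rest =>
      let name1 := if count = 0 then line else name
      let count1 := if count = 0 then count + 1 else count
      let loc1 := if count1 = 1 ∧ PySem.Str.isIn "," line = true then line else loc
      let count2 := if count1 = 1 ∧ PySem.Str.isIn "," line = true then count1 + 1 else count1
      let kms1 := if PySem.Str.isIn "km" line then line else kms
      let trans1 := if PySem.Str.isIn "Automatic" line then line else trans
      let trans2 := if PySem.Str.isIn "Manual" line then line else trans1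
      let eng1 := if PySem.Str.isIn "cc" line then line else eng
      let price1 := if PySem.Str.isIn "$" line then line else price
      grabLoopA rest name1 loc1 kms1 eng1 trans2 price1 count2

def grab_details (car_text : String) : List (String × String) :=
  let lines := PySem.Str.splitlines car_text
  let lines := lines.filter (fun line => !(PySem.Str.isIn "Listed within the last 7 days" line))
  grabLoopA lines "" "" "" "" "" "" 0

-- ===== PORT B =====
-- next((l for l in reversed(lines) if sub in l), "")
def lastWith (lines : List String) (sub : String) : String :=
  (lines.reverse.find? (fun l => PySem.Str.isIn sub l)).getD ""

def grab_details_alt (car_text : String) : List (String × String) :=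
  let lines := (PySem.Str.splitlines car_text).filter
      (fun line => !(PySem.Str.isIn "Listed within the last 7 days" line))
  [("Name", lines.headD ""),
   ("Location", (lines.find? (fun l => PySem.Str.isIn "," l)).getD ""),
   ("KMs", lastWith lines "km"),
   ("Engine Size", lastWith lines "cc"),
   ("Transmission", (lines.reverse.find? (fun l =>
        PySem.Str.isIn "Manual" l || PySem.Str.isIn "Automatic" l)).getD ""),
   ("Price", lastWith lines "$")]

-- ===== PRECONDITION & SPEC =====
def Spec_grab_details (car_text : String) (out : List (String × String)) : Prop := out = grab_details_alt car_text
instance (car_text : String) (out : List (String × String)) : Decidable (Spec_grab_details car_text out) := by unfold Spec_grab_details; infer_instance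

-- ===== CLAIM (what is proved, stated in full; the proofs are below) =====
def Claim_equal_grab_details : Prop := ∀ (car_text : String), Dom_grab_details car_text → Spec_grab_details car_text (grab_details car_text)

-- ===== LEMMAS AND PROOFS =====

-- backwards search over a cons: fold the head into the default
lemma find?_reverse_cons {α : Type} (p : α → Bool) (x : α) (xs : List α) (d : α) :
    (((x :: xs).reverse.find? p).getD d) = ((xs.reverse.find? p).getD (if p x then x else d)) := by
  rw [List.reverse_cons, List.find?_append]
  cases h : xs.reverse.find? p with
  | some v => simp
  | none => cases hp : p x <;> simp [List.find?, hp]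

-- A's two transmission updates collapse to one search-predicate update
lemma trans_step (line t : String) :
    (if PySem.Str.isIn "Manual" line = true then line
     else if PySem.Str.isIn "Automatic" line = true then line else t)
      = (if (PySem.Str.isIn "Manual" line || PySem.Str.isIn "Automatic" line) = true then line
         else t) := by
  cases hM : PySem.Str.isIn "Manual" line <;>
    cases hA : PySem.Str.isIn "Automatic" line <;> simp

-- once count = 2, name and location are frozen; the other fields take the last match
lemma grabLoopA_two (ls : List String) :
    ∀ (name loc kms eng trans price : String),
    grabLoopA ls name loc kms eng trans price 2 =
      [("Name", name), ("Location", loc),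
       ("KMs", (ls.reverse.find? (fun l => PySem.Str.isIn "km" l)).getD kms),
       ("Engine Size", (ls.reverse.find? (fun l => PySem.Str.isIn "cc" l)).getD eng),
       ("Transmission", (ls.reverse.find? (fun l =>
            PySem.Str.isIn "Manual" l || PySem.Str.isIn "Automatic" l)).getD trans),
       ("Price", (ls.reverse.find? (fun l => PySem.Str.isIn "$" l)).getD price)] := by
  induction ls with
  | nil => intro name loc kms eng trans price; simp [grabLoopA]
  | cons x xs ih =>
      intro name loc kms eng trans price
      rw [grabLoopA]
      simp only [show ((2:Int) = 0) = False by simp, show ((2:Int) = 1) = False by simp,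
        if_false, false_and]
      rw [ih]
      rw [find?_reverse_cons, find?_reverse_cons, find?_reverse_cons, find?_reverse_cons]
      rw [trans_step]

-- at count = 1, location becomes the first comma line
lemma grabLoopA_one (ls : List String) :
    ∀ (name loc kms eng trans price : String),
    grabLoopA ls name loc kms eng trans price 1 =
      [("Name", name),
       ("Location", (ls.find? (fun l => PySem.Str.isIn "," l)).getD loc),
       ("KMs", (ls.reverse.find? (fun l => PySem.Str.isIn "km" l)).getD kms),
       ("Engine Size", (ls.reverse.find? (fun l => PySem.Str.isIn "cc" l)).getD eng),
       ("Transmission", (ls.reverse.find? (fun l =>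
            PySem.Str.isIn "Manual" l || PySem.Str.isIn "Automatic" l)).getD trans),
       ("Price", (ls.reverse.find? (fun l => PySem.Str.isIn "$" l)).getD price)] := by
  induction ls with
  | nil => intro name loc kms eng trans price; simp [grabLoopA]
  | cons x xs ih =>
      intro name loc kms eng trans price
      rw [grabLoopA]
      simp only [show ((1:Int) = 0) = False by simp, if_false, true_and]
      by_cases hc : PySem.Str.isIn "," x = true
      · rw [if_pos hc, if_pos hc, show (1:Int) + 1 = 2 by norm_num]
        rw [grabLoopA_two]
        rw [List.find?_cons_of_pos hc]
        rw [find?_reverse_cons, find?_reverse_cons, find?_reverse_cons, find?_reverse_cons]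
        rw [trans_step]
        simp
      · rw [if_neg hc, if_neg hc]
        rw [ih]
        rw [List.find?_cons_of_neg (by simpa using hc)]
        rw [find?_reverse_cons, find?_reverse_cons, find?_reverse_cons, find?_reverse_cons]
        rw [trans_step]

lemma grab_details_eq_alt (car_text : String) :
    grab_details car_text = grab_details_alt car_text := by
  simp only [grab_details, grab_details_alt, lastWith]
  generalize (PySem.Str.splitlines car_text).filter
      (fun line => !(PySem.Str.isIn "Listed within the last 7 days" line)) = L
  cases L with
  | nil => simp [grabLoopA]
  | cons x xs =>
      rw [grabLoopA]
      simp only [if_true, show (0:Int) + 1 = 1 by norm_num, true_and]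
      by_cases hc : PySem.Str.isIn "," x = true
      · rw [if_pos hc, if_pos hc, show (1:Int) + 1 = 2 by norm_num]
        rw [grabLoopA_two]
        rw [List.find?_cons_of_pos hc]
        rw [find?_reverse_cons, find?_reverse_cons, find?_reverse_cons, find?_reverse_cons]
        rw [trans_step]
        simp
      · rw [if_neg hc, if_neg hc]
        rw [grabLoopA_one]
        rw [List.find?_cons_of_neg (by simpa using hc)]
        rw [find?_reverse_cons, find?_reverse_cons, find?_reverse_cons, find?_reverse_cons]
        rw [trans_step]
        simp

-- ===== VERDICT (by name: the statement is the Claim_ definition above) =====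
theorem grab_details_spec : Claim_equal_grab_details := by
  intro car_text _
  exact grab_details_eq_alt car_text
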